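-- pv_equiv track=rewrite | github.com/J-King-Dottie/ausdata-ai-harness | backend/app/harness/parser.py | _candidate_score
-- ===== SOURCE A (Python) =====
-- from typing import Any, Dict, Optional
--
-- def _candidate_score(decoded: Any) -> int:
--     if not isinstance(decoded, dict):
--         return -1
--     score = 0
--     for key in ("step", "progress_note", "model_output"):
--         if key in decoded:
--             score += 3
--     for key in (
--         "tool_name",
--         "tool_input",
--         "final_answer_markdown",
--         "plan_markdown",
--         "summary",
--         "message",
--         "status",
--         "progress",
--     ):
--         if key in decoded:
--             score += 1
--     return score
-- ===== SOURCE B (Python) =====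
-- from typing import Any, Dict, Optional
--
-- _WEIGHTS = {
--     "step": 3,
--     "progress_note": 3,
--     "model_output": 3,
--     "tool_name": 1,
--     "tool_input": 1,
--     "final_answer_markdown": 1,
--     "plan_markdown": 1,
--     "summary": 1,
--     "message": 1,
--     "status": 1,
--     "progress": 1,
-- }
--
-- def _candidate_score(decoded: Any) -> int:
--     if not isinstance(decoded, dict):
--         return -1
--     return sum(_WEIGHTS.get(k, 0) for k in decoded)
-- ===== Notes on version B (the rewrite author's own statement) =====
-- stated objective: idiomatic
-- what changed: Instead of iterating the two fixed schema-key tuples and testing membership in the input dict, B builds a static weight table once and makes a single pass over the input dict's own keys, summing each key's weight (0 if unknown).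
import Mathlib
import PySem

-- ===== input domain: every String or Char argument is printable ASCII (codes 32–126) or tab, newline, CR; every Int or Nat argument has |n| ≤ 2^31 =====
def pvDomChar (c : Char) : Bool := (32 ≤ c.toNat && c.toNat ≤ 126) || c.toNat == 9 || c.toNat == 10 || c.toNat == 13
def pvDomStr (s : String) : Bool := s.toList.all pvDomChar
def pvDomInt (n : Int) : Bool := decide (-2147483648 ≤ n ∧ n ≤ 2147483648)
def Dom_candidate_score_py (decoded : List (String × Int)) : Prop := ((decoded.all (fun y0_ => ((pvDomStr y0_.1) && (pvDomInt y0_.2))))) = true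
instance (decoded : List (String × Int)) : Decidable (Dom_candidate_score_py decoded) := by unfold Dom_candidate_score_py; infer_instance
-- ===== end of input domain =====

-- B replaces the fixed-schema membership scan by a single pass over the input dict's own keys with a static weight table.


-- ===== PORT A =====
def pvFixed3 : List String := ["step", "progress_note", "model_output"]
def pvFixed1 : List String :=
  ["tool_name", "tool_input", "final_answer_markdown", "plan_markdown",
   "summary", "message", "status", "progress"]

def candidate_score_py (decoded : List (String × Int)) : Int :=
  -- 'isinstance(decoded, dict)' is always true under the type convention (decoded : dict)
  let keys := decoded.map Prod.fst
  let score : Int := pvFixed3.foldl (fun s k => if keys.contains k then s + 3 else s) 0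
  let score := pvFixed1.foldl (fun s k => if keys.contains k then s + 1 else s) score
  score

-- ===== PORT B =====
def pvWeights : PySem.Dict String Int :=
  PySem.Dict.ofList
    [("step", 3), ("progress_note", 3), ("model_output", 3),
     ("tool_name", 1), ("tool_input", 1), ("final_answer_markdown", 1),
     ("plan_markdown", 1), ("summary", 1), ("message", 1), ("status", 1), ("progress", 1)]

def candidate_score_py_alt (decoded : List (String × Int)) : Int :=
  -- sum(_WEIGHTS.get(k, 0) for k in decoded); the isinstance guard is always true here
  ((decoded.map Prod.fst).map (fun k => pvWeights.getD k 0)).sum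

-- ===== PRECONDITION & SPEC =====
-- Pre_ excludes association lists with duplicate keys: they do not correspond to any Python
-- dict (a dict's keys are unique), so A's duplicate-blind membership score there is accidental.
def Pre_candidate_score_py (decoded : List (String × Int)) : Prop :=
  (decoded.map Prod.fst).Nodup
instance (decoded : List (String × Int)) : Decidable (Pre_candidate_score_py decoded) := by
  unfold Pre_candidate_score_py; infer_instance

def pvWitness_candidate_score_py : (List (String × Int)) := [("step", 1), ("foo", 2)]

def Spec_candidate_score_py (decoded : List (String × Int)) (out : Int) : Prop := out = candidate_score_py_alt decoded
instance (decoded : List (String × Int)) (out : Int) : Decidable (Spec_candidate_score_py decoded out) := by unfold Spec_candidate_score_py; infer_instance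

-- ===== CLAIM (what is proved, stated in full; the proofs are below) =====
def Claim_equal_candidate_score_py : Prop := ∀ (decoded : List (String × Int)), Dom_candidate_score_py decoded → Pre_candidate_score_py decoded → Spec_candidate_score_py decoded (candidate_score_py decoded)

-- ===== LEMMAS AND PROOFS =====

theorem pvWeights_mk : pvWeights = PySem.Dict.mk
    [("step", 3), ("progress_note", 3), ("model_output", 3),
     ("tool_name", 1), ("tool_input", 1), ("final_answer_markdown", 1),
     ("plan_markdown", 1), ("summary", 1), ("message", 1), ("status", 1), ("progress", 1)] := by decide

-- A's membership fold over a fixed key list, as a sum of indicator terms.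
theorem foldl_if_sum (mem : String → Bool) (w0 : Int) :
    ∀ (L : List String) (c : Int),
      L.foldl (fun s k => if mem k then s + w0 else s) c
        = c + (L.map (fun k => if mem k then w0 else 0)).sum := by
  intro L
  induction L with
  | nil => intro c; simp
  | cons a t ih =>
      intro c
      by_cases h : mem a
      all_goals simp [List.foldl, h, ih]
      all_goals ring

-- B's weight-table sum over distinct keys equals the 11 indicator terms.
theorem sum_w_eq (ks : List String) (h : ks.Nodup) :
    (ks.map (fun k => pvWeights.getD k 0)).sum
      = ((if ks.contains "step" then (3:Int) else 0)
        + (if ks.contains "progress_note" then 3 else 0)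
        + (if ks.contains "model_output" then 3 else 0))
        + ((if ks.contains "tool_name" then (1:Int) else 0)
        + (if ks.contains "tool_input" then 1 else 0)
        + (if ks.contains "final_answer_markdown" then 1 else 0)
        + (if ks.contains "plan_markdown" then 1 else 0)
        + (if ks.contains "summary" then 1 else 0)
        + (if ks.contains "message" then 1 else 0)
        + (if ks.contains "status" then 1 else 0)
        + (if ks.contains "progress" then 1 else 0)) := by
  induction ks with
  | nil => simp
  | cons a t ih =>
      rcases List.nodup_cons.mp h with ⟨ha, ht⟩
      simp only [List.map_cons, List.sum_cons, ih ht]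
      by_cases h1 : a = "step"
      · subst h1
        simp [show pvWeights.getD "step" 0 = (3:Int) from by decide, ha]
        ring
      by_cases h2 : a = "progress_note"
      · subst h2
        simp [show pvWeights.getD "progress_note" 0 = (3:Int) from by decide, ha]
        ring
      by_cases h3 : a = "model_output"
      · subst h3
        simp [show pvWeights.getD "model_output" 0 = (3:Int) from by decide, ha]
        ring
      by_cases h4 : a = "tool_name"
      · subst h4
        simp [show pvWeights.getD "tool_name" 0 = (1:Int) from by decide, ha]
        ring
      by_cases h5 : a = "tool_input"
      · subst h5
        simp [show pvWeights.getD "tool_input" 0 = (1:Int) from by decide, ha]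
        ring
      by_cases h6 : a = "final_answer_markdown"
      · subst h6
        simp [show pvWeights.getD "final_answer_markdown" 0 = (1:Int) from by decide, ha]
        ring
      by_cases h7 : a = "plan_markdown"
      · subst h7
        simp [show pvWeights.getD "plan_markdown" 0 = (1:Int) from by decide, ha]
        ring
      by_cases h8 : a = "summary"
      · subst h8
        simp [show pvWeights.getD "summary" 0 = (1:Int) from by decide, ha]
        ring
      by_cases h9 : a = "message"
      · subst h9
        simp [show pvWeights.getD "message" 0 = (1:Int) from by decide, ha]
        ring
      by_cases h10 : a = "status"
      · subst h10
        simp [show pvWeights.getD "status" 0 = (1:Int) from by decide, ha]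
        ring
      by_cases h11 : a = "progress"
      · subst h11
        simp [show pvWeights.getD "progress" 0 = (1:Int) from by decide, ha]
        ring
      simp [show pvWeights.getD a 0 = 0 from by
          simp [pvWeights_mk, PySem.Dict.getD, PySem.Dict.get?,
            Ne.symm h1, Ne.symm h2, Ne.symm h3, Ne.symm h4, Ne.symm h5, Ne.symm h6,
            Ne.symm h7, Ne.symm h8, Ne.symm h9, Ne.symm h10, Ne.symm h11],
        Ne.symm h1, Ne.symm h2, Ne.symm h3, Ne.symm h4, Ne.symm h5, Ne.symm h6,
        Ne.symm h7, Ne.symm h8, Ne.symm h9, Ne.symm h10, Ne.symm h11]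
  
-- ===== VERDICT (by name: the statement is the Claim_ definition above) =====
theorem candidate_score_py_spec : Claim_equal_candidate_score_py := by
  intro decoded _ hpre
  unfold Spec_candidate_score_py candidate_score_py candidate_score_py_alt
  rw [sum_w_eq _ hpre]
  simp only [pvFixed3, pvFixed1, foldl_if_sum]
  simp [List.map, List.sum]
  ring
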